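-- pv_equiv track=rewrite | github.com/nikdimentiy/mint | CodeSignal/holiday.py | solution
-- ===== SOURCE A (Python) =====
-- def solution(x: int, weekDay: str, month: str, yearNumber: int) -> int:
--     """
--     Calculates the day of the month on which a specified occurrence of a holiday will be celebrated
--     in a given year based on the day of the week.
--
--     Args:
--     - x (int): A positive integer representing the occurrence of the day of the week within the month (1 for the first occurrence, 2 for the second, etc.).
--     - weekDay (str): A string representing the name of a day of the week (e.g., "Monday", "Tuesday").
--     - month (str): A string representing the name of a month (e.g., "January", "February").
--     - yearNumber (int): An integer representing the year for which to calculate the holiday date.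
--
--     Returns:
--     - int: The day of the month on which the holiday will be celebrated in the given year,
--            or -1 if there is no such occurrence in that month.
--     """
--
--     # Define a dictionary to map month names to their corresponding lengths.
--     month_lengths = {
--         "January": 31,
--         "February": 28,
--         "March": 31,
--         "April": 30,
--         "May": 31,
--         "June": 30,
--         "July": 31,
--         "August": 31,
--         "September": 30,
--         "October": 31,
--         "November": 30,
--         "December": 31
--     }
--
--     # Define a dictionary to map day of the week names to their corresponding numerical values.
--     weekDay_to_num = {
--         "Monday": 0,
--         "Tuesday": 1,
--         "Wednesday": 2,
--         "Thursday": 3,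
--         "Friday": 4,
--         "Saturday": 5,
--         "Sunday": 6
--     }
--
--     # Get the numerical value of the day of the week.
--     weekDay_num = weekDay_to_num[weekDay]
--
--     # Get the length of the month.
--     month_length = month_lengths[month]
--
--     # Check if the year is a leap year.
--     is_leap_year = (yearNumber % 4 == 0 and yearNumber % 100 != 0) or yearNumber % 400 == 0
--
--     # Adjust the length of February if it's a leap year.
--     if month == "February" and is_leap_year:
--         month_length = 29
--
--     # Calculate the number of occurrences of the day of the week in the month.
--     num_occurrences = 0
--     for day in range(1, month_length + 1):
--         if weekDay_num == (day - 1) % 7: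
--             num_occurrences += 1
--             if num_occurrences == x:
--                 return day
--
--     # If there were not enough occurrences of the day of the week, return -1.
--     return -1
-- ===== SOURCE B (Python) =====
-- def solution(x: int, weekDay: str, month: str, yearNumber: int) -> int:
--     day_names = ["Monday", "Tuesday", "Wednesday", "Thursday", "Friday", "Saturday", "Sunday"]
--     month_names = ["January", "February", "March", "April", "May", "June",
--                    "July", "August", "September", "October", "November", "December"]
--     wd = day_names.index(weekDay)
--     m = month_names.index(month)
--     if m == 1:
--         leap = (yearNumber % 4 == 0 and yearNumber % 100 != 0) or yearNumber % 400 == 0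
--         length = 29 if leap else 28
--     else:
--         length = 31 if m in (0, 2, 4, 6, 7, 9, 11) else 30
--     # closed form: the x-th occurrence of weekDay falls on day wd + 1 + 7*(x-1)
--     day = wd + 1 + 7 * (x - 1)
--     return day if x >= 1 and day <= length else -1
-- ===== Notes on version B (the rewrite author's own statement) =====
-- stated objective: simpler
-- what changed: Drops both lookup dicts and the day-by-day counting loop: B finds the weekday/month by position in name lists, derives the month length from the month index, and returns the closed-form day wd + 1 + 7*(x-1) guarded by x >= 1 and day <= length.
import Mathlib
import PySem

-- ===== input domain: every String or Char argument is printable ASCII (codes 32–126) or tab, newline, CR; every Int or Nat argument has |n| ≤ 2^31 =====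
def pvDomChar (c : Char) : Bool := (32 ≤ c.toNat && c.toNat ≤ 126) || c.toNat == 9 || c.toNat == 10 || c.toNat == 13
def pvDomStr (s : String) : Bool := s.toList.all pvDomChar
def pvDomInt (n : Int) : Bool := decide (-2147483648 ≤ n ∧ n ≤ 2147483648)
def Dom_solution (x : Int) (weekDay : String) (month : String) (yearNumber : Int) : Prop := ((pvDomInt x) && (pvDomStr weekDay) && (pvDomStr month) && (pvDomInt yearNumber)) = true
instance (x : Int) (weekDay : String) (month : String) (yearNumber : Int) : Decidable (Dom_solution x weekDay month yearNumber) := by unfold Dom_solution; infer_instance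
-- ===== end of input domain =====

-- B drops the lookup dicts and the counting loop: it locates the names by list position,
-- derives the month length from the month index, and returns the closed-form day wd+1+7*(x-1).

-- ===== PORT A =====
def pvMonthLens : PySem.Dict String Int := PySem.Dict.ofList
  [("January", 31), ("February", 28), ("March", 31), ("April", 30),
   ("May", 31), ("June", 30), ("July", 31), ("August", 31),
   ("September", 30), ("October", 31), ("November", 30), ("December", 31)]

def pvWeekNums : PySem.Dict String Int := PySem.Dict.ofList
  [("Monday", 0), ("Tuesday", 1), ("Wednesday", 2), ("Thursday", 3),
   ("Friday", 4), ("Saturday", 5), ("Sunday", 6)]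

-- the for-loop of A with its early return: state is num_occurrences
def pvLoopA (weekDayNum x : Int) : List Int → Int → Int
  | [], _ => -1
  | d :: ds, num =>
      if weekDayNum == PySem.Int.mod (d - 1) 7 then
        if num + 1 == x then d else pvLoopA weekDayNum x ds (num + 1)
      else pvLoopA weekDayNum x ds num

def solution (x : Int) (weekDay : String) (month : String) (yearNumber : Int) : Int :=
  match pvWeekNums.get? weekDay, pvMonthLens.get? month with
  | some weekDayNum, some ml =>
      let isLeap := (PySem.Int.mod yearNumber 4 == 0 && !(PySem.Int.mod yearNumber 100 == 0)) || PySem.Int.mod yearNumber 400 == 0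
      let monthLength := if month == "February" && isLeap then 29 else ml
      pvLoopA weekDayNum x (PySem.List.pyRange 1 (monthLength + 1) 1) 0
  | _, _ => 0  -- Python raises KeyError here; excluded by Pre_solution

-- ===== PORT B =====
def pvDayNames : List String :=
  ["Monday", "Tuesday", "Wednesday", "Thursday", "Friday", "Saturday", "Sunday"]

def pvMonthNames : List String :=
  ["January", "February", "March", "April", "May", "June",
   "July", "August", "September", "October", "November", "December"]

def solution_alt (x : Int) (weekDay : String) (month : String) (yearNumber : Int) : Int :=
  match PySem.List.index? pvDayNames weekDay with
  | none => 0  -- Python raises ValueError here; excluded by Pre_solution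
  | some wd =>
    match PySem.List.index? pvMonthNames month with
    | none => 0  -- Python raises ValueError here; excluded by Pre_solution
    | some m =>
        let length : Int :=
          if m == 1 then
            if (PySem.Int.mod yearNumber 4 == 0 && !(PySem.Int.mod yearNumber 100 == 0)) || PySem.Int.mod yearNumber 400 == 0
            then 29 else 28
          else
            -- 'm in (0, 2, 4, 6, 7, 9, 11)': membership in a literal tuple, ported as the equality chain (exact)
            if m == 0 || m == 2 || m == 4 || m == 6 || m == 7 || m == 9 || m == 11 then 31 else 30
        let day : Int := (wd : Int) + 1 + 7 * (x - 1)
        if x ≥ 1 && day ≤ length then day else -1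

-- ===== PRECONDITION & SPEC =====
-- Pre_ excludes exactly the inputs on which Python A raises KeyError (unknown weekday or month name).
def Pre_solution (x : Int) (weekDay : String) (month : String) (yearNumber : Int) : Prop :=
  weekDay ∈ ["Monday", "Tuesday", "Wednesday", "Thursday", "Friday", "Saturday", "Sunday"] ∧
  month ∈ ["January", "February", "March", "April", "May", "June",
           "July", "August", "September", "October", "November", "December"]
instance (x : Int) (weekDay : String) (month : String) (yearNumber : Int) : Decidable (Pre_solution x weekDay month yearNumber) := by unfold Pre_solution; infer_instance

def pvWitness_solution : Int × String × String × Int := (2, "Friday", "February", 2024)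

def Spec_solution (x : Int) (weekDay : String) (month : String) (yearNumber : Int) (out : Int) : Prop := out = solution_alt x weekDay month yearNumber
instance (x : Int) (weekDay : String) (month : String) (yearNumber : Int) (out : Int) : Decidable (Spec_solution x weekDay month yearNumber out) := by unfold Spec_solution; infer_instance

-- ===== CLAIM (what is proved, stated in full; the proofs are below) =====
def Claim_equal_solution : Prop := ∀ (x : Int) (weekDay : String) (month : String) (yearNumber : Int), Dom_solution x weekDay month yearNumber → Pre_solution x weekDay month yearNumber → Spec_solution x weekDay month yearNumber (solution x weekDay month yearNumber)

-- ===== LEMMAS AND PROOFS =====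

lemma pvGA_W0 : pvWeekNums.get? "Monday" = some 0 := by decide
lemma pvGA_W1 : pvWeekNums.get? "Tuesday" = some 1 := by decide
lemma pvGA_W2 : pvWeekNums.get? "Wednesday" = some 2 := by decide
lemma pvGA_W3 : pvWeekNums.get? "Thursday" = some 3 := by decide
lemma pvGA_W4 : pvWeekNums.get? "Friday" = some 4 := by decide
lemma pvGA_W5 : pvWeekNums.get? "Saturday" = some 5 := by decide
lemma pvGA_W6 : pvWeekNums.get? "Sunday" = some 6 := by decide

lemma pvGA_M0 : pvMonthLens.get? "January" = some 31 := by decide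
lemma pvGA_M1 : pvMonthLens.get? "February" = some 28 := by decide
lemma pvGA_M2 : pvMonthLens.get? "March" = some 31 := by decide
lemma pvGA_M3 : pvMonthLens.get? "April" = some 30 := by decide
lemma pvGA_M4 : pvMonthLens.get? "May" = some 31 := by decide
lemma pvGA_M5 : pvMonthLens.get? "June" = some 30 := by decide
lemma pvGA_M6 : pvMonthLens.get? "July" = some 31 := by decide
lemma pvGA_M7 : pvMonthLens.get? "August" = some 31 := by decide
lemma pvGA_M8 : pvMonthLens.get? "September" = some 30 := by decide
lemma pvGA_M9 : pvMonthLens.get? "October" = some 31 := by decide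
lemma pvGA_M10 : pvMonthLens.get? "November" = some 30 := by decide
lemma pvGA_M11 : pvMonthLens.get? "December" = some 31 := by decide

lemma pvIdx_W0 : PySem.List.index? pvDayNames "Monday" = some 0 := by decide
lemma pvIdx_W1 : PySem.List.index? pvDayNames "Tuesday" = some 1 := by decide
lemma pvIdx_W2 : PySem.List.index? pvDayNames "Wednesday" = some 2 := by decide
lemma pvIdx_W3 : PySem.List.index? pvDayNames "Thursday" = some 3 := by decide
lemma pvIdx_W4 : PySem.List.index? pvDayNames "Friday" = some 4 := by decide
lemma pvIdx_W5 : PySem.List.index? pvDayNames "Saturday" = some 5 := by decide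
lemma pvIdx_W6 : PySem.List.index? pvDayNames "Sunday" = some 6 := by decide

lemma pvIdx_M0 : PySem.List.index? pvMonthNames "January" = some 0 := by decide
lemma pvIdx_M1 : PySem.List.index? pvMonthNames "February" = some 1 := by decide
lemma pvIdx_M2 : PySem.List.index? pvMonthNames "March" = some 2 := by decide
lemma pvIdx_M3 : PySem.List.index? pvMonthNames "April" = some 3 := by decide
lemma pvIdx_M4 : PySem.List.index? pvMonthNames "May" = some 4 := by decide
lemma pvIdx_M5 : PySem.List.index? pvMonthNames "June" = some 5 := by decide
lemma pvIdx_M6 : PySem.List.index? pvMonthNames "July" = some 6 := by decide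
lemma pvIdx_M7 : PySem.List.index? pvMonthNames "August" = some 7 := by decide
lemma pvIdx_M8 : PySem.List.index? pvMonthNames "September" = some 8 := by decide
lemma pvIdx_M9 : PySem.List.index? pvMonthNames "October" = some 9 := by decide
lemma pvIdx_M10 : PySem.List.index? pvMonthNames "November" = some 10 := by decide
lemma pvIdx_M11 : PySem.List.index? pvMonthNames "December" = some 11 := by decide

-- loop invariant: entering the loop at day a with counter num, the next occurrence of the
-- weekday is day wd + 1 + 7*num, and it lies within the next 7 days
lemma pvLoopInv (wd x : Int) (hw1 : 0 ≤ wd) (hw2 : wd < 7) :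
    ∀ (n : Nat) (a num : Int), a ≤ wd + 1 + 7 * num → wd + 1 + 7 * num < a + 7 →
    pvLoopA wd x (PySem.List.pyRange a (a + n) 1) num =
      (if num < x ∧ wd + 1 + 7 * (x - 1) < a + n then wd + 1 + 7 * (x - 1) else -1) := by
  intro n
  induction n with
  | zero =>
    intro a num h1 h2
    rw [show a + (0:Nat) = a by norm_num, PySem.List.pyRange_one_eq_nil le_rfl]
    simp only [pvLoopA]
    rw [if_neg]; omega
  | succ n ih =>
    intro a num h1 h2
    rw [PySem.List.pyRange_one_cons (by omega),
      show a + ((n:Nat)+1:Nat) = (a+1) + (n:Nat) by push_cast; ring]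
    simp only [pvLoopA]
    rw [PySem.Int.mod_eq_emod_of_pos (by norm_num)]
    by_cases hc : wd = (a - 1) % 7
    · rw [if_pos (by exact beq_iff_eq.mpr hc)]
      have ha : a = wd + 1 + 7 * num := by omega
      by_cases hx : num + 1 = x
      · rw [if_pos (beq_iff_eq.mpr hx), if_pos (by omega)]
        omega
      · rw [if_neg (by simpa using hx), ih (a+1) (num+1) (by omega) (by omega)]
        exact if_congr (by constructor <;> (rintro ⟨p, q⟩; exact ⟨by omega, q⟩)) rfl rfl
    · rw [if_neg (by simpa using hc), ih (a+1) num (by omega) (by omega)]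

-- the x-th occurrence found by A's loop over days 1..L is exactly wd+1+7*(x-1) when that lands in the month
lemma pvKey (wd L x : Int) (hw1 : 0 ≤ wd) (hw2 : wd ≤ 6) (hL : 1 ≤ L) :
    pvLoopA wd x (PySem.List.pyRange 1 (L + 1) 1) 0 =
      (if x ≥ 1 && wd + 1 + 7 * (x - 1) ≤ L then wd + 1 + 7 * (x - 1) else -1) := by
  rw [show L + 1 = 1 + (L.toNat : Int) from by omega,
    pvLoopInv wd x hw1 (by omega) L.toNat 1 0 (by omega) (by omega)]
  split_ifs <;> simp only [Bool.and_eq_true, decide_eq_true_eq, ge_iff_le] at * <;> omega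

-- ===== VERDICT (by name: the statement is the Claim_ definition above) =====
theorem solution_spec : Claim_equal_solution := by
  intro x weekDay month yearNumber _ hpre
  unfold Spec_solution
  obtain ⟨hw, hm⟩ := hpre
  fin_cases hw <;> fin_cases hm <;>
  · simp only [solution, solution_alt,
      pvGA_W0, pvGA_W1, pvGA_W2, pvGA_W3, pvGA_W4, pvGA_W5, pvGA_W6,
      pvGA_M0, pvGA_M1, pvGA_M2, pvGA_M3, pvGA_M4, pvGA_M5, pvGA_M6, pvGA_M7, pvGA_M8, pvGA_M9, pvGA_M10, pvGA_M11,
      pvIdx_W0, pvIdx_W1, pvIdx_W2, pvIdx_W3, pvIdx_W4, pvIdx_W5, pvIdx_W6,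
      pvIdx_M0, pvIdx_M1, pvIdx_M2, pvIdx_M3, pvIdx_M4, pvIdx_M5, pvIdx_M6, pvIdx_M7, pvIdx_M8, pvIdx_M9, pvIdx_M10, pvIdx_M11]
    rw [pvKey _ _ x (by norm_num) (by norm_num) (by split_ifs <;> norm_num)]
    simp
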